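-- pv_equiv track=rewrite | github.com/cyugao/sample-code | Python/Algorithms/dp.py | max_weight_with_choice
-- ===== SOURCE A (Python) =====
-- def max_weight_with_choice(w):
--     n = len(w)
--     if (n == 1): return w
--     choice = [False for _ in range(n)]
--     result = [None for _ in range(n)]
--     result[0] = w[0]
--     choice[0] = True
--     if w[0] < w[1]:
--         choice[1] = True
--         result[1] = w[1]
--     else:
--         result[1] = w[0]
--     for i in range(2, n):
--         temp = result[i-2] + w[i]
--         if temp > result[i-1]:
--             choice[i] = True
--             result[i] = temp
--         else:
--             result[i] = result[i-1]
--     return result, choice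
-- ===== SOURCE B (Python) =====
-- def max_weight_with_choice(w):
--     n = len(w)
--     # ending[j]: best total of a non-adjacent selection that starts at index 0 or 1
--     # and ends exactly at index j
--     ending = []
--     for j in range(n):
--         if j < 2:
--             ending.append(w[j])
--         else:
--             ending.append(w[j] + max(ending[:j - 1]))
--     # the answer for the prefix w[:i+1] is the best chain ending anywhere in it,
--     # and index i is picked exactly when it strictly improves on the previous prefix
--     result = []
--     choice = []
--     for i in range(n):
--         best = max(ending[:i + 1])
--         choice.append(i == 0 or best > result[-1])
--         result.append(best)
--     return result, choice
-- ===== Notes on version B (the rewrite author's own statement) =====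
-- stated objective: alternative
-- what changed: B solves the problem via a different table: ending[j] = best chain ending exactly at j, computed with an inner scan max(ending[:j-1]), and then takes result[i] = max(ending[:i+1]) (a prefix maximum) with choice[i] true when that prefix maximum strictly improves; A instead fills result directly with the take/skip recurrence max(result[i-1], result[i-2]+w[i]) and sets choice inline.
-- outside the precondition, e.g. on max_weight_with_choice([5]): A returns (5,), B returns ([5], [True])
import Mathlib
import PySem

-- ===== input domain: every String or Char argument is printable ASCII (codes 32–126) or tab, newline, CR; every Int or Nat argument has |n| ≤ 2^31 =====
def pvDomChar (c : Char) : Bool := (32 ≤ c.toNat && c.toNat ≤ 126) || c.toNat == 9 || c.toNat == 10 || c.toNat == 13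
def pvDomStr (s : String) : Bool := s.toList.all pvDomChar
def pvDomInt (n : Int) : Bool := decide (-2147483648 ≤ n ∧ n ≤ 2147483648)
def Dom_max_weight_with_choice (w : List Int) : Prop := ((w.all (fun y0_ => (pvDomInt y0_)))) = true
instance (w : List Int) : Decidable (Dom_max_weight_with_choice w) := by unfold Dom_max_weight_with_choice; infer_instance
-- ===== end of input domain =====

-- B replaces A's take/skip recurrence by a different table: ending[j] = best chain ending exactly
-- at j (inner prefix scan), with result[i] = max(ending[:i+1]) a prefix maximum; alternative algorithm.

-- ===== PORT A =====
-- body of A's 'for i in range(2, n)': temp = result[i-2] + w[i]; branch sets result[i]/choice[i]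
def mwcStepA (w : List Int) (st : List Int × List Bool) (i : Int) : List Int × List Bool :=
  let temp := PySem.List.pyGetD st.1 (i - 2) 0 + PySem.List.pyGetD w i 0
  if temp > PySem.List.pyGetD st.1 (i - 1) 0 then
    (st.1 ++ [temp], st.2 ++ [true])
  else
    (st.1 ++ [PySem.List.pyGetD st.1 (i - 1) 0], st.2 ++ [false])

-- A's code before the loop: result[0], choice[0], and the w[0] < w[1] branch for index 1
def mwcInitA (w : List Int) : List Int × List Bool :=
  if PySem.List.pyGetD w 0 0 < PySem.List.pyGetD w 1 0 then
    ([PySem.List.pyGetD w 0 0, PySem.List.pyGetD w 1 0], [true, true])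
  else
    ([PySem.List.pyGetD w 0 0, PySem.List.pyGetD w 0 0], [true, false])

-- n == 1: Python A returns the bare list w, not a pair (excluded by Pre_); (w, []) is a placeholder.
-- n == 0: Python A raises IndexError at w[0] (excluded by Pre_); pyGetD's default stands in.
def max_weight_with_choice (w : List Int) : List Int × List Bool :=
  let n : Int := w.length
  if n == 1 then (w, [])
  else (PySem.List.pyRange 2 n 1).foldl (mwcStepA w) (mwcInitA w)

-- ===== PORT B =====
-- B's first loop: ending.append(w[j]) for j < 2, else ending.append(w[j] + max(ending[:j-1]))
def mwcEStep (w : List Int) (E : List Int) (j : Int) : List Int :=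
  if j < 2 then E ++ [PySem.List.pyGetD w j 0]
  else E ++ [PySem.List.pyGetD w j 0 +
              (PySem.List.max? (PySem.List.slice E none (some (j - 1))) (fun y => y)).getD 0]

-- B's second loop: best = max(ending[:i+1]); choice.append(i == 0 or best > result[-1]); result.append(best)
def mwcOStep (E : List Int) (st : List Int × List Bool) (i : Int) : List Int × List Bool :=
  let best := (PySem.List.max? (PySem.List.slice E none (some (i + 1))) (fun y => y)).getD 0
  let c := if i == 0 then true else decide (best > PySem.List.pyGetD st.1 (-1) 0)
  (st.1 ++ [best], st.2 ++ [c])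

def max_weight_with_choice_alt (w : List Int) : List Int × List Bool :=
  let n : Int := w.length
  let E := (PySem.List.pyRange 0 n 1).foldl (mwcEStep w) []
  (PySem.List.pyRange 0 n 1).foldl (mwcOStep E) ([], [])

-- ===== PRECONDITION & SPEC =====
-- Pre_ excludes n == 0 (A raises IndexError) and n == 1 (A returns the bare list w, not a
-- (result, choice) pair, so its value is not of the declared return type).
def Pre_max_weight_with_choice (w : List Int) : Prop := 2 ≤ w.length
instance (w : List Int) : Decidable (Pre_max_weight_with_choice w) := by unfold Pre_max_weight_with_choice; infer_instance
def pvWitness_max_weight_with_choice : List Int := [3, 1, 4]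

def Spec_max_weight_with_choice (w : List Int) (out : List Int × List Bool) : Prop := out = max_weight_with_choice_alt w
instance (w : List Int) (out : List Int × List Bool) : Decidable (Spec_max_weight_with_choice w out) := by unfold Spec_max_weight_with_choice; infer_instance

-- ===== CLAIM (what is proved, stated in full; the proofs are below) =====
def Claim_equal_max_weight_with_choice : Prop := ∀ (w : List Int), Dom_max_weight_with_choice w → Pre_max_weight_with_choice w → Spec_max_weight_with_choice w (max_weight_with_choice w)

-- ===== LEMMAS AND PROOFS =====

-- value of A's result table at index i (the take/skip recurrence)
def mV (w : List Int) : Nat → Int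
  | 0 => w.getD 0 0
  | 1 => max (w.getD 0 0) (w.getD 1 0)
  | (n + 2) => max (mV w (n + 1)) (mV w n + w.getD (n + 2) 0)

-- value of B's ending table at index j
def eV (w : List Int) (j : Nat) : Int :=
  if j < 2 then w.getD j 0 else w.getD j 0 + mV w (j - 2)

-- the common choice flag at index i
def fl (w : List Int) (i : Nat) : Bool :=
  if i = 0 then true else decide (mV w (i - 1) < mV w i)

lemma max?_id_append (xs : List Int) (x : Int) :
    PySem.List.max? (xs ++ [x]) (fun y => y) =
      some (match PySem.List.max? xs (fun y => y) with | none => x | some m => max m x) := by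
  cases xs with
  | nil =>
    rw [List.nil_append, PySem.List.max?_id_cons]
    simp [PySem.List.max?]
  | cons h t =>
    rw [List.cons_append, PySem.List.max?_id_cons, PySem.List.max?_id_cons]
    simp [List.foldl_append]

-- the maximum of B's ending table over a prefix IS the take/skip value mV
lemma maxE (w : List Int) : ∀ m : Nat,
    PySem.List.max? ((List.range (m + 1)).map (eV w)) (fun y => y) = some (mV w m) := by
  intro m
  induction m with
  | zero => simp [PySem.List.max?_id_cons, eV, mV]
  | succ m ih =>
    rw [List.range_succ, List.map_append, List.map_singleton, max?_id_append, ih]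
    congr 1
    match m with
    | 0 => simp [eV, mV]
    | Nat.succ k =>
      show max (mV w (k + 1)) (eV w (k + 2)) = mV w (k + 2)
      have : eV w (k + 2) = w.getD (k + 2) 0 + mV w k := by
        simp [eV]
      rw [this, show mV w (k + 2) = max (mV w (k + 1)) (mV w k + w.getD (k + 2) 0) from rfl]
      ring_nf

lemma ebuild (w : List Int) : ∀ k : Nat,
    (PySem.List.pyRange 0 (k : Int) 1).foldl (mwcEStep w) [] = (List.range k).map (eV w) := by
  intro k
  induction k with
  | zero => simp [PySem.List.pyRange_one_eq_nil]
  | succ k ih =>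
    have hc : ((k : Int) + 1) = ((k + 1 : Nat) : Int) := by push_cast; ring
    rw [show ((k + 1 : Nat) : Int) = (k : Int) + 1 by push_cast; ring,
        PySem.List.pyRange_one_succ_right (by positivity), List.foldl_append, ih]
    simp only [List.foldl_cons, List.foldl_nil]
    unfold mwcEStep
    by_cases h2 : (k : Int) < 2
    · rw [if_pos h2, List.range_succ, List.map_append, List.map_singleton]
      congr 2
      have : eV w k = w.getD k 0 := by
        unfold eV; rw [if_pos (by exact_mod_cast h2)]
      rw [this, PySem.List.pyGetD_natCast]
    · rw [if_neg h2]
      have hk2 : 2 ≤ k := by exact_mod_cast not_lt.mp h2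
      have hsl : PySem.List.slice ((List.range k).map (eV w)) none (some ((k : Int) - 1)) =
          (List.range (k - 1)).map (eV w) := by
        rw [show ((k : Int) - 1) = ((k - 1 : Nat) : Int) by omega, PySem.List.slice_to_natCast,
            ← List.map_take, List.take_range]
        congr 2
        omega
      rw [hsl, show k - 1 = (k - 2) + 1 by omega, maxE w (k - 2)]
      rw [List.range_succ, List.map_append, List.map_singleton]
      congr 2
      unfold eV
      rw [if_neg (by omega), PySem.List.pyGetD_natCast]
      simp

lemma bout (w : List Int) : ∀ k : Nat, k ≤ w.length →
    (PySem.List.pyRange 0 (k : Int) 1).foldl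
        (mwcOStep ((List.range w.length).map (eV w))) ([], []) =
      ((List.range k).map (mV w), (List.range k).map (fl w)) := by
  intro k hk
  induction k with
  | zero => simp [PySem.List.pyRange_one_eq_nil]
  | succ k ih =>
    have hk' : k ≤ w.length := by omega
    rw [show ((k + 1 : Nat) : Int) = (k : Int) + 1 by push_cast; ring,
        PySem.List.pyRange_one_succ_right (by positivity), List.foldl_append, ih hk']
    simp only [List.foldl_cons, List.foldl_nil]
    unfold mwcOStep
    have hsl : PySem.List.slice ((List.range w.length).map (eV w)) none (some ((k : Int) + 1)) =
        (List.range (k + 1)).map (eV w) := by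
      rw [show ((k : Int) + 1) = ((k + 1 : Nat) : Int) by push_cast; ring,
          PySem.List.slice_to_natCast, ← List.map_take, List.take_range]
      congr 2
      omega
    rw [hsl, maxE w k]
    simp only [Option.getD_some]
    have hres : (List.range (k + 1)).map (mV w) = (List.range k).map (mV w) ++ [mV w k] := by
      rw [List.range_succ, List.map_append, List.map_singleton]
    have hcho : (List.range (k + 1)).map (fl w) = (List.range k).map (fl w) ++ [fl w k] := by
      rw [List.range_succ, List.map_append, List.map_singleton]
    rw [hres, hcho]
    cases k with
    | zero => simp [fl]
    | succ j =>
      have hbeq : ¬ (((j + 1 : Nat) : Int) == 0) = true := by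
        simp; omega
      simp only [hbeq, Bool.false_eq_true, if_false]
      have hlast : PySem.List.pyGetD ((List.range (j + 1)).map (mV w)) (-1) 0 = mV w j := by
        rw [PySem.List.pyGetD_neg_ofNat _ 1 0 (by omega) (by simp)]
        simp [List.getElem_map, List.getElem_range]
      rw [hlast]
      congr 2

lemma pyGetD_map_range (f : Nat → Int) (k m : Nat) (h : m < k) :
    PySem.List.pyGetD ((List.range k).map f) (m : Int) 0 = f m := by
  rw [PySem.List.pyGetD_natCast, List.getD_eq_getElem _ _ (by simpa using h)]
  simp [List.getElem_map, List.getElem_range]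

lemma aloop (w : List Int) (_hlen : 2 ≤ w.length) : ∀ k : Nat, 2 + k ≤ w.length →
    (PySem.List.pyRange 2 (2 + (k : Int)) 1).foldl (mwcStepA w) (mwcInitA w) =
      ((List.range (2 + k)).map (mV w), (List.range (2 + k)).map (fl w)) := by
  intro k
  induction k with
  | zero =>
    intro _
    rw [show ((2 : Int) + ((0 : Nat) : Int)) = 2 by norm_num,
        PySem.List.pyRange_one_eq_nil (by norm_num), List.foldl_nil]
    unfold mwcInitA
    have hr : List.range (2 + 0) = [0, 1] := by decide
    have h0 : PySem.List.pyGetD w 0 0 = w.getD 0 0 := by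
      rw [show (0 : Int) = ((0 : Nat) : Int) by norm_num, PySem.List.pyGetD_natCast]
    have h1 : PySem.List.pyGetD w 1 0 = w.getD 1 0 := by
      rw [show (1 : Int) = ((1 : Nat) : Int) by norm_num, PySem.List.pyGetD_natCast]
    rw [hr]
    simp only [List.map_cons, List.map_nil]
    by_cases h : PySem.List.pyGetD w 0 0 < PySem.List.pyGetD w 1 0
    · rw [if_pos h]
      rw [h0, h1] at h
      have hm1 : mV w 1 = w.getD 1 0 := max_eq_right (le_of_lt h)
      have hfl : fl w 1 = true := by
        unfold fl
        rw [if_neg (by omega : ¬ (1 : Nat) = 0), show mV w 0 = w.getD 0 0 from rfl, hm1]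
        exact decide_eq_true h
      rw [show mV w 0 = w.getD 0 0 from rfl, hm1, show fl w 0 = true from rfl, hfl, h0, h1]
    · rw [if_neg h]
      rw [h0, h1] at h
      have hm1 : mV w 1 = w.getD 0 0 := max_eq_left (le_of_not_gt h)
      have hfl : fl w 1 = false := by
        unfold fl
        rw [if_neg (by omega : ¬ (1 : Nat) = 0), show mV w 0 = w.getD 0 0 from rfl, hm1]
        simp
      rw [show mV w 0 = w.getD 0 0 from rfl, hm1, show fl w 0 = true from rfl, hfl, h0]
  | succ k ih =>
    intro hk
    have hk' : 2 + k ≤ w.length := by omega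
    rw [show ((2 : Int) + ((k + 1 : Nat) : Int)) = (2 + (k : Int)) + 1 by push_cast [Nat.cast_add]; ring,
        PySem.List.pyRange_one_succ_right (by omega), List.foldl_append, ih hk']
    simp only [List.foldl_cons, List.foldl_nil]
    unfold mwcStepA
    have e2 : (2 : Int) + (k : Int) - 2 = ((k : Nat) : Int) := by push_cast; ring
    have e1 : (2 : Int) + (k : Int) - 1 = ((k + 1 : Nat) : Int) := by push_cast; ring
    have ew : PySem.List.pyGetD w (2 + (k : Int)) 0 = w.getD (2 + k) 0 := by
      rw [show ((2 : Int) + (k : Int)) = ((2 + k : Nat) : Int) by push_cast; ring,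
          PySem.List.pyGetD_natCast]
    have g2 : PySem.List.pyGetD ((List.range (2 + k)).map (mV w)) (2 + (k : Int) - 2) 0 = mV w k := by
      rw [e2, pyGetD_map_range _ _ _ (by omega)]
    have g1 : PySem.List.pyGetD ((List.range (2 + k)).map (mV w)) (2 + (k : Int) - 1) 0 = mV w (k + 1) := by
      rw [e1, pyGetD_map_range _ _ _ (by omega)]
    simp only [g2, g1, ew]
    have hmv : mV w (k + 2) = max (mV w (k + 1)) (mV w k + w.getD (k + 2) 0) := rfl
    have hres : (List.range (2 + (k + 1))).map (mV w) = (List.range (2 + k)).map (mV w) ++ [mV w (k + 2)] := by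
      rw [show 2 + (k + 1) = (2 + k) + 1 by ring, List.range_succ, List.map_append,
          List.map_singleton, show 2 + k = k + 2 by ring]
    have hcho : (List.range (2 + (k + 1))).map (fl w) = (List.range (2 + k)).map (fl w) ++ [fl w (k + 2)] := by
      rw [show 2 + (k + 1) = (2 + k) + 1 by ring, List.range_succ, List.map_append,
          List.map_singleton, show 2 + k = k + 2 by ring]
    have hwidx : w.getD (2 + k) 0 = w.getD (k + 2) 0 := by rw [Nat.add_comm]
    rw [hwidx]
    by_cases h : mV w k + w.getD (k + 2) 0 > mV w (k + 1)
    · rw [if_pos h, hres, hcho]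
      have hv : mV w (k + 2) = mV w k + w.getD (k + 2) 0 := by
        rw [hmv, max_eq_right (le_of_lt h)]
      have hf : fl w (k + 2) = true := by
        unfold fl
        simp only [if_neg (by omega : ¬ k + 2 = 0)]
        rw [hv]
        simpa using h
      rw [hv, hf]
    · rw [if_neg h, hres, hcho]
      have hv : mV w (k + 2) = mV w (k + 1) := by
        rw [hmv, max_eq_left (by omega)]
      have hf : fl w (k + 2) = false := by
        unfold fl
        simp only [if_neg (by omega : ¬ k + 2 = 0)]
        rw [hv]
        simp
      rw [hv, hf]

-- ===== VERDICT (by name: the statement is the Claim_ definition above) =====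
theorem max_weight_with_choice_spec : Claim_equal_max_weight_with_choice := by
  intro w _hdom hpre
  unfold Pre_max_weight_with_choice at hpre
  unfold Spec_max_weight_with_choice max_weight_with_choice max_weight_with_choice_alt
  have hn1 : ¬ ((w.length : Int) == 1) = true := by simp; omega
  simp only [hn1, Bool.false_eq_true, if_false]
  rw [ebuild w w.length, bout w w.length (le_refl _)]
  obtain ⟨k, hk⟩ : ∃ k, w.length = 2 + k := ⟨w.length - 2, by omega⟩
  rw [hk, show ((2 + k : Nat) : Int) = 2 + (k : Int) by push_cast; ring,
      aloop w (by omega) k (by omega)]
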